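-- pv_equiv track=rewrite | github.com/tobiasleibrock/anlp-prompt-formatting | reformat/reformat/rules.py | _convert_alpha
-- ===== SOURCE A (Python) =====
-- def _convert_alpha(prompt: str, upper: bool = True) -> str:
--     alpha_map = {
--         1: "A",
--         2: "B",
--         3: "C",
--         4: "D",
--         5: "E",
--         6: "F",
--         7: "G",
--         8: "H",
--         9: "I",
--         10: "J",
--     }
--     for num, letter in alpha_map.items():
--         if not upper:
--             letter = letter.lower()
--         prompt = prompt.replace(str(num), letter)
--     return prompt
-- ===== SOURCE B (Python) =====
-- def _convert_alpha(prompt: str, upper: bool = True) -> str: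
--     letters = "ABCDEFGHI" if upper else "abcdefghi"
--     table = str.maketrans("123456789", letters)
--     return prompt.translate(table)
-- ===== Notes on version B (the rewrite author's own statement) =====
-- stated objective: idiomatic
-- what changed: B builds one character translation table ('1'..'9' to A..I, lowercased when upper is False, '0' and a '10' entry deliberately absent since A's '1'->'A' pass already consumed every '1') and applies str.translate in a single pass, replacing A's loop of ten str.replace scans.
import Mathlib
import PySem

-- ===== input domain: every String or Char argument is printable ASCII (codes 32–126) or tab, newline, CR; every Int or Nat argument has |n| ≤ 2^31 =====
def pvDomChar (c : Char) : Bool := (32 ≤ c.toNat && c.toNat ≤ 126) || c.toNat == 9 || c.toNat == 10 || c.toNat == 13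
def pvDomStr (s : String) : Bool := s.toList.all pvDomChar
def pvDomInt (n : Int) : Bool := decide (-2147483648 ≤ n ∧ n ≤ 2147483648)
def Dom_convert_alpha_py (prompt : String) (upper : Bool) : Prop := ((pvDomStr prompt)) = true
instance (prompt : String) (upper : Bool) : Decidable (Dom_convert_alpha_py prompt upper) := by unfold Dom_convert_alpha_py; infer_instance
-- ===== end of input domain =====

-- B replaces A's loop of ten str.replace passes by one translation table applied in a single pass (idiomatic; return-value equivalence, no mutation involved).

-- ===== PORT A =====
def convert_alpha_py (prompt : String) (upper : Bool) : String :=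
  let alpha_map : PySem.Dict Int String :=
    PySem.Dict.mk [(1, "A"), (2, "B"), (3, "C"), (4, "D"), (5, "E"),
                   (6, "F"), (7, "G"), (8, "H"), (9, "I"), (10, "J")]
  alpha_map.items.foldl
    (fun p nl =>
      let letter := if !upper then PySem.Str.lower nl.2 else nl.2
      PySem.Str.replace p (PySem.Int.toStr nl.1) letter)
    prompt

-- ===== PORT B =====
def convert_alpha_py_alt (prompt : String) (upper : Bool) : String :=
  let letters : List Char := if upper then "ABCDEFGHI".toList else "abcdefghi".toList
  let table : PySem.Dict Char Char := PySem.Dict.mk (List.zip "123456789".toList letters)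
  String.ofList (prompt.toList.map (fun c => table.getD c c))

-- ===== PRECONDITION & SPEC =====
def Spec_convert_alpha_py (prompt : String) (upper : Bool) (out : String) : Prop := out = convert_alpha_py_alt prompt upper
instance (prompt : String) (upper : Bool) (out : String) : Decidable (Spec_convert_alpha_py prompt upper out) := by unfold Spec_convert_alpha_py; infer_instance

-- ===== CLAIM (what is proved, stated in full; the proofs are below) =====
def Claim_equal_convert_alpha_py : Prop := ∀ (prompt : String) (upper : Bool), Dom_convert_alpha_py prompt upper → Spec_convert_alpha_py prompt upper (convert_alpha_py prompt upper)

-- ===== LEMMAS AND PROOFS =====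

-- helper facts: no step of the char map can produce the character '1'
theorem pv_base_ne (c l : Char) (hl : l ≠ '1') : (if c == '1' then l else c) ≠ '1' := by
  split_ifs with h
  · exact hl
  · simpa using h

theorem pv_step_ne (x d l : Char) (hl : l ≠ '1') (hx : x ≠ '1') : (if x == d then l else x) ≠ '1' := by
  split_ifs with h
  · exact hl
  · exact hx

-- replacing a single character by a single character is a character map
theorem go_single (o n : Char) (l : List Char) : ∀ (fuel : Nat) (acc : List Char),
    l.length ≤ fuel →
    PySem.Chars.replace.go [o] [n] fuel l acc
      = acc.reverse ++ l.map (fun c => if c == o then n else c) := by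
  induction l with
  | nil =>
    intro fuel acc _
    cases fuel <;> simp [PySem.Chars.replace.go]
  | cons c t ih =>
    intro fuel acc hf
    cases fuel with
    | zero => simp at hf
    | succ fuel =>
      simp only [List.length_cons, Nat.succ_le_succ_iff] at hf
      by_cases h : o = c
      · subst h
        simp [PySem.Chars.replace.go, List.isPrefixOf, ih fuel _ hf]
      · simp [PySem.Chars.replace.go, List.isPrefixOf, h, ih fuel _ hf, Ne.symm h]

theorem replace_single (o n : Char) (l : List Char) :
    PySem.Chars.replace l [o] [n] = l.map (fun c => if c == o then n else c) := by
  simp [PySem.Chars.replace, go_single o n l l.length [] le_rfl]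

-- replacing "10" in a string that contains no '1' is the identity
theorem go_ten (nw : List Char) (l : List Char) : ∀ (fuel : Nat) (acc : List Char),
    l.length ≤ fuel → (∀ c ∈ l, c ≠ '1') →
    PySem.Chars.replace.go ['1', '0'] nw fuel l acc = acc.reverse ++ l := by
  induction l with
  | nil =>
    intro fuel acc _ _
    cases fuel <;> simp [PySem.Chars.replace.go]
  | cons c t ih =>
    intro fuel acc hf hm
    cases fuel with
    | zero => simp at hf
    | succ fuel =>
      simp only [List.length_cons, Nat.succ_le_succ_iff] at hf
      have hc : c ≠ '1' := hm c (by simp)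
      have : (['1', '0'].isPrefixOf (c :: t)) = false := by
        simp [List.isPrefixOf]
        intro h; exact absurd h.symm hc
      simp [PySem.Chars.replace.go, this,
            ih fuel _ hf (fun x hx => hm x (by simp [hx]))]

theorem replace_ten (nw : List Char) (l : List Char) (h : ∀ c ∈ l, c ≠ '1') :
    PySem.Chars.replace l ['1', '0'] nw = l := by
  simp [PySem.Chars.replace, go_ten nw l l.length [] le_rfl h]

-- ===== VERDICT (by name: the statement is the Claim_ definition above) =====
set_option maxHeartbeats 1000000 in
theorem convert_alpha_py_spec : Claim_equal_convert_alpha_py := by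
  intro prompt upper _
  unfold Spec_convert_alpha_py
  rw [← String.toList_inj]
  have e1 : PySem.Int.toStr 1 = "1" := by decide
  have e2 : PySem.Int.toStr 2 = "2" := by decide
  have e3 : PySem.Int.toStr 3 = "3" := by decide
  have e4 : PySem.Int.toStr 4 = "4" := by decide
  have e5 : PySem.Int.toStr 5 = "5" := by decide
  have e6 : PySem.Int.toStr 6 = "6" := by decide
  have e7 : PySem.Int.toStr 7 = "7" := by decide
  have e8 : PySem.Int.toStr 8 = "8" := by decide
  have e9 : PySem.Int.toStr 9 = "9" := by decide
  have e10 : PySem.Int.toStr 10 = "10" := by decide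
  cases upper
  · simp only [convert_alpha_py, convert_alpha_py_alt, PySem.Dict.items, List.foldl,
      e1, e2, e3, e4, e5, e6, e7, e8, e9, e10, Bool.not_false, if_true, if_false,
      PySem.Str.toList_replace]
    have t1 : ("1" : String).toList = ['1'] := by decide
    have t2 : ("2" : String).toList = ['2'] := by decide
    have t3 : ("3" : String).toList = ['3'] := by decide
    have t4 : ("4" : String).toList = ['4'] := by decide
    have t5 : ("5" : String).toList = ['5'] := by decide
    have t6 : ("6" : String).toList = ['6'] := by decide
    have t7 : ("7" : String).toList = ['7'] := by decide
    have t8 : ("8" : String).toList = ['8'] := by decide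
    have t9 : ("9" : String).toList = ['9'] := by decide
    have t10 : ("10" : String).toList = ['1', '0'] := by decide
    have lA : (PySem.Str.lower "A").toList = ['a'] := by decide
    have lB : (PySem.Str.lower "B").toList = ['b'] := by decide
    have lC : (PySem.Str.lower "C").toList = ['c'] := by decide
    have lD : (PySem.Str.lower "D").toList = ['d'] := by decide
    have lE : (PySem.Str.lower "E").toList = ['e'] := by decide
    have lF : (PySem.Str.lower "F").toList = ['f'] := by decide
    have lG : (PySem.Str.lower "G").toList = ['g'] := by decide
    have lH : (PySem.Str.lower "H").toList = ['h'] := by decide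
    have lI : (PySem.Str.lower "I").toList = ['i'] := by decide
    have lJ : (PySem.Str.lower "J").toList = ['j'] := by decide
    have z : ("123456789" : String).toList.zip ("abcdefghi" : String).toList
        = [('1','a'),('2','b'),('3','c'),('4','d'),('5','e'),('6','f'),('7','g'),('8','h'),('9','i')] := by decide
    simp only [t1, t2, t3, t4, t5, t6, t7, t8, t9, t10, lA, lB, lC, lD, lE, lF, lG, lH, lI, lJ,
      replace_single]
    rw [replace_ten]
    · simp only [List.map_map, String.toList_ofList, reduceIte, Bool.false_eq_true, z]
      refine List.map_congr_left ?_
      intro a _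
      by_cases h1 : a = '1'; · subst h1; decide
      by_cases h2 : a = '2'; · subst h2; decide
      by_cases h3 : a = '3'; · subst h3; decide
      by_cases h4 : a = '4'; · subst h4; decide
      by_cases h5 : a = '5'; · subst h5; decide
      by_cases h6 : a = '6'; · subst h6; decide
      by_cases h7 : a = '7'; · subst h7; decide
      by_cases h8 : a = '8'; · subst h8; decide
      by_cases h9 : a = '9'; · subst h9; decide
      simp [Function.comp, PySem.Dict.getD, PySem.Dict.get?, List.find?,
        beq_eq_false_iff_ne.mpr h1, beq_eq_false_iff_ne.mpr h2, beq_eq_false_iff_ne.mpr h3,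
        beq_eq_false_iff_ne.mpr h4, beq_eq_false_iff_ne.mpr h5, beq_eq_false_iff_ne.mpr h6,
        beq_eq_false_iff_ne.mpr h7, beq_eq_false_iff_ne.mpr h8, beq_eq_false_iff_ne.mpr h9,
        beq_eq_false_iff_ne.mpr (Ne.symm h1), beq_eq_false_iff_ne.mpr (Ne.symm h2),
        beq_eq_false_iff_ne.mpr (Ne.symm h3), beq_eq_false_iff_ne.mpr (Ne.symm h4),
        beq_eq_false_iff_ne.mpr (Ne.symm h5), beq_eq_false_iff_ne.mpr (Ne.symm h6),
        beq_eq_false_iff_ne.mpr (Ne.symm h7), beq_eq_false_iff_ne.mpr (Ne.symm h8),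
        beq_eq_false_iff_ne.mpr (Ne.symm h9)]
    · intro x hx
      obtain ⟨c8, hc8, rfl⟩ := List.mem_map.mp hx
      refine pv_step_ne _ '9' 'i' (by decide) ?_
      obtain ⟨c7, hc7, rfl⟩ := List.mem_map.mp hc8
      refine pv_step_ne _ '8' 'h' (by decide) ?_
      obtain ⟨c6, hc6, rfl⟩ := List.mem_map.mp hc7
      refine pv_step_ne _ '7' 'g' (by decide) ?_
      obtain ⟨c5, hc5, rfl⟩ := List.mem_map.mp hc6
      refine pv_step_ne _ '6' 'f' (by decide) ?_
      obtain ⟨c4, hc4, rfl⟩ := List.mem_map.mp hc5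
      refine pv_step_ne _ '5' 'e' (by decide) ?_
      obtain ⟨c3, hc3, rfl⟩ := List.mem_map.mp hc4
      refine pv_step_ne _ '4' 'd' (by decide) ?_
      obtain ⟨c2, hc2, rfl⟩ := List.mem_map.mp hc3
      refine pv_step_ne _ '3' 'c' (by decide) ?_
      obtain ⟨c1, hc1, rfl⟩ := List.mem_map.mp hc2
      refine pv_step_ne _ '2' 'b' (by decide) ?_
      obtain ⟨c0, -, rfl⟩ := List.mem_map.mp hc1
      exact pv_base_ne c0 'a' (by decide)
  · simp only [convert_alpha_py, convert_alpha_py_alt, PySem.Dict.items, List.foldl,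
      e1, e2, e3, e4, e5, e6, e7, e8, e9, e10, Bool.not_true, Bool.false_eq_true, reduceIte,
      PySem.Str.toList_replace]
    have t1 : ("1" : String).toList = ['1'] := by decide
    have t2 : ("2" : String).toList = ['2'] := by decide
    have t3 : ("3" : String).toList = ['3'] := by decide
    have t4 : ("4" : String).toList = ['4'] := by decide
    have t5 : ("5" : String).toList = ['5'] := by decide
    have t6 : ("6" : String).toList = ['6'] := by decide
    have t7 : ("7" : String).toList = ['7'] := by decide
    have t8 : ("8" : String).toList = ['8'] := by decide
    have t9 : ("9" : String).toList = ['9'] := by decide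
    have t10 : ("10" : String).toList = ['1', '0'] := by decide
    have uA : ("A" : String).toList = ['A'] := by decide
    have uB : ("B" : String).toList = ['B'] := by decide
    have uC : ("C" : String).toList = ['C'] := by decide
    have uD : ("D" : String).toList = ['D'] := by decide
    have uE : ("E" : String).toList = ['E'] := by decide
    have uF : ("F" : String).toList = ['F'] := by decide
    have uG : ("G" : String).toList = ['G'] := by decide
    have uH : ("H" : String).toList = ['H'] := by decide
    have uI : ("I" : String).toList = ['I'] := by decide
    have uJ : ("J" : String).toList = ['J'] := by decide
    have z : ("123456789" : String).toList.zip ("ABCDEFGHI" : String).toList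
        = [('1','A'),('2','B'),('3','C'),('4','D'),('5','E'),('6','F'),('7','G'),('8','H'),('9','I')] := by decide
    simp only [t1, t2, t3, t4, t5, t6, t7, t8, t9, t10, uA, uB, uC, uD, uE, uF, uG, uH, uI, uJ,
      replace_single]
    rw [replace_ten]
    · simp only [List.map_map, String.toList_ofList, reduceIte, Bool.false_eq_true, z]
      refine List.map_congr_left ?_
      intro a _
      by_cases h1 : a = '1'; · subst h1; decide
      by_cases h2 : a = '2'; · subst h2; decide
      by_cases h3 : a = '3'; · subst h3; decide
      by_cases h4 : a = '4'; · subst h4; decide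
      by_cases h5 : a = '5'; · subst h5; decide
      by_cases h6 : a = '6'; · subst h6; decide
      by_cases h7 : a = '7'; · subst h7; decide
      by_cases h8 : a = '8'; · subst h8; decide
      by_cases h9 : a = '9'; · subst h9; decide
      simp [Function.comp, PySem.Dict.getD, PySem.Dict.get?, List.find?,
        beq_eq_false_iff_ne.mpr h1, beq_eq_false_iff_ne.mpr h2, beq_eq_false_iff_ne.mpr h3,
        beq_eq_false_iff_ne.mpr h4, beq_eq_false_iff_ne.mpr h5, beq_eq_false_iff_ne.mpr h6,
        beq_eq_false_iff_ne.mpr h7, beq_eq_false_iff_ne.mpr h8, beq_eq_false_iff_ne.mpr h9,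
        beq_eq_false_iff_ne.mpr (Ne.symm h1), beq_eq_false_iff_ne.mpr (Ne.symm h2),
        beq_eq_false_iff_ne.mpr (Ne.symm h3), beq_eq_false_iff_ne.mpr (Ne.symm h4),
        beq_eq_false_iff_ne.mpr (Ne.symm h5), beq_eq_false_iff_ne.mpr (Ne.symm h6),
        beq_eq_false_iff_ne.mpr (Ne.symm h7), beq_eq_false_iff_ne.mpr (Ne.symm h8),
        beq_eq_false_iff_ne.mpr (Ne.symm h9)]
    · intro x hx
      obtain ⟨c8, hc8, rfl⟩ := List.mem_map.mp hx
      refine pv_step_ne _ '9' 'I' (by decide) ?_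
      obtain ⟨c7, hc7, rfl⟩ := List.mem_map.mp hc8
      refine pv_step_ne _ '8' 'H' (by decide) ?_
      obtain ⟨c6, hc6, rfl⟩ := List.mem_map.mp hc7
      refine pv_step_ne _ '7' 'G' (by decide) ?_
      obtain ⟨c5, hc5, rfl⟩ := List.mem_map.mp hc6
      refine pv_step_ne _ '6' 'F' (by decide) ?_
      obtain ⟨c4, hc4, rfl⟩ := List.mem_map.mp hc5
      refine pv_step_ne _ '5' 'E' (by decide) ?_
      obtain ⟨c3, hc3, rfl⟩ := List.mem_map.mp hc4
      refine pv_step_ne _ '4' 'D' (by decide) ?_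
      obtain ⟨c2, hc2, rfl⟩ := List.mem_map.mp hc3
      refine pv_step_ne _ '3' 'C' (by decide) ?_
      obtain ⟨c1, hc1, rfl⟩ := List.mem_map.mp hc2
      refine pv_step_ne _ '2' 'B' (by decide) ?_
      obtain ⟨c0, -, rfl⟩ := List.mem_map.mp hc1
      exact pv_base_ne c0 'A' (by decide)
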